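-- pv_equiv track=rewrite | github.com/HSP6301/PRODIGY_CS_03 | PasswordChecker.py | generate_suggestion
-- ===== SOURCE A (Python) =====
-- def generate_suggestion(password):
--     # Suggestions to improve password strength
--     suggestions = []
--
--     if len(password) < 8:
--         suggestions.append("Increase the length to at least 8 characters.")
--
--     if not any(char.islower() for char in password):
--         suggestions.append("Add lowercase letters.")
--
--     if not any(char.isupper() for char in password):
--         suggestions.append("Add uppercase letters.")
--
--     if not any(char.isdigit() for char in password):
--         suggestions.append("Include digits.")
--
--     if not any(char in '!@#$%^&*()-_=+[{]};:\'",<.>/?\\|`~' for char in password):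
--         suggestions.append("Use special characters like !@#$%^&*")
--
--     if not suggestions:
--         suggestions.append("Try combining different types of characters.")
--
--     return " ".join(suggestions)
-- ===== SOURCE B (Python) =====
-- SPECIALS = '!@#$%^&*()-_=+[{]};:\'",<.>/?\\|`~'
--
-- # bit table: which class-bit missing triggers which message
-- MESSAGES = [
--     (1, "Add lowercase letters."),
--     (2, "Add uppercase letters."),
--     (4, "Include digits."),
--     (8, "Use special characters like !@#$%^&*"),
-- ]
--
-- def _classify(ch):
--     # map a character to a bitmask of the character classes it belongs to
--     return ((1 if ch.islower() else 0)
--             | (2 if ch.isupper() else 0)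
--             | (4 if ch.isdigit() else 0)
--             | (8 if ch in SPECIALS else 0))
--
-- def generate_suggestion(password):
--     mask = 0
--     for ch in password:
--         mask |= _classify(ch)
--     suggestions = (["Increase the length to at least 8 characters."] if len(password) < 8 else []) \
--         + [msg for bit, msg in MESSAGES if not mask & bit]
--     return " ".join(suggestions) if suggestions else "Try combining different types of characters."
-- ===== Notes on version B (the rewrite author's own statement) =====
-- stated objective: alternative
-- what changed: B folds the password into one integer bitmask of present character classes (each char mapped to a class bitmask once) and then selects the messages table-driven by testing missing bits against a (bit, message) table, with the fallback as a conditional expression, instead of A's five independent if-statements each running its own any() scan and appending.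
import Mathlib
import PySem

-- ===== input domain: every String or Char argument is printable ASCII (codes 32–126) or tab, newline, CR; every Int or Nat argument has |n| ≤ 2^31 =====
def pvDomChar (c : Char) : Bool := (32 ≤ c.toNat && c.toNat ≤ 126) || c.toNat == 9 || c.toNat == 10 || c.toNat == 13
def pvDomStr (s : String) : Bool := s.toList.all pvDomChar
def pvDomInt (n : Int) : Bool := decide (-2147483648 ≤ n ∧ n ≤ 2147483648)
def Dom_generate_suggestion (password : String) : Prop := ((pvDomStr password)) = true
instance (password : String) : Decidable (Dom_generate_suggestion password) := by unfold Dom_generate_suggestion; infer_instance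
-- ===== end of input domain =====

-- B: one bitmask fold over the password plus a table-driven selection of the missing-class messages, instead of A's five if-statements with separate any() scans (alternative decomposition, same cost class).

-- the exact special-character string of the Python source
def pvSpecials : List Char := "!@#$%^&*()-_=+[{]};:'\",<.>/?\\|`~".toList

-- ===== PORT A =====
-- 'char in <specials string>' for a single char is exactly list membership of that char
def generate_suggestion (password : String) : String :=
  let cs := password.toList
  let suggestions : List String := []
  let suggestions := if PySem.Str.len password < 8 then
      suggestions ++ ["Increase the length to at least 8 characters."] else suggestions
  let suggestions := if !(cs.any PySem.Chars.islower) then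
      suggestions ++ ["Add lowercase letters."] else suggestions
  let suggestions := if !(cs.any PySem.Chars.isupper) then
      suggestions ++ ["Add uppercase letters."] else suggestions
  let suggestions := if !(cs.any PySem.Chars.isdigit) then
      suggestions ++ ["Include digits."] else suggestions
  let suggestions := if !(cs.any (fun c => pvSpecials.contains c)) then
      suggestions ++ ["Use special characters like !@#$%^&*"] else suggestions
  let suggestions := if suggestions.isEmpty then
      suggestions ++ ["Try combining different types of characters."] else suggestions
  PySem.Str.join " " suggestions

-- ===== PORT B =====
def pvClassify (ch : Char) : Nat :=
  (if PySem.Chars.islower ch then 1 else 0) |||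
  (if PySem.Chars.isupper ch then 2 else 0) |||
  (if PySem.Chars.isdigit ch then 4 else 0) |||
  (if pvSpecials.contains ch then 8 else 0)

def pvMessages : List (Nat × String) :=
  [(1, "Add lowercase letters."),
   (2, "Add uppercase letters."),
   (4, "Include digits."),
   (8, "Use special characters like !@#$%^&*")]

def generate_suggestion_alt (password : String) : String :=
  let mask := password.toList.foldl (fun m ch => m ||| pvClassify ch) 0
  let suggestions :=
    (if PySem.Str.len password < 8 then ["Increase the length to at least 8 characters."] else [])
    ++ ((pvMessages.filter (fun p => mask &&& p.1 == 0)).map Prod.snd)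
  if suggestions.isEmpty then "Try combining different types of characters."
  else PySem.Str.join " " suggestions

-- ===== PRECONDITION & SPEC =====
def Spec_generate_suggestion (password : String) (out : String) : Prop := out = generate_suggestion_alt password
instance (password : String) (out : String) : Decidable (Spec_generate_suggestion password out) := by unfold Spec_generate_suggestion; infer_instance

-- ===== CLAIM (what is proved, stated in full; the proofs are below) =====
def Claim_equal_generate_suggestion : Prop := ∀ (password : String), Dom_generate_suggestion password → Spec_generate_suggestion password (generate_suggestion password)

-- ===== LEMMAS AND PROOFS =====

def pvMaskOf (a b c d : Bool) : Nat :=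
  (if a then 1 else 0) ||| (if b then 2 else 0) ||| (if c then 4 else 0) ||| (if d then 8 else 0)

-- OR-ing two class masks merges the flags componentwise
theorem pv_maskOf_or (m : Nat) (a b c d a' b' c' d' : Bool) :
    (m ||| pvMaskOf a b c d) ||| pvMaskOf a' b' c' d'
    = m ||| pvMaskOf (a || a') (b || b') (c || c') (d || d') := by
  cases a <;> cases b <;> cases c <;> cases d <;>
    cases a' <;> cases b' <;> cases c' <;> cases d' <;>
    simp [pvMaskOf, Nat.or_assoc, Nat.or_comm, Nat.or_left_comm]

-- the bitmask fold computes the OR of the four 'any' scans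
theorem pv_mask_eq (cs : List Char) (m : Nat) :
    cs.foldl (fun m ch => m ||| pvClassify ch) m
    = m ||| pvMaskOf (cs.any PySem.Chars.islower) (cs.any PySem.Chars.isupper)
              (cs.any PySem.Chars.isdigit) (cs.any (fun c => pvSpecials.contains c)) := by
  induction cs generalizing m with
  | nil => simp [pvMaskOf]
  | cons x xs ih =>
      rw [List.foldl_cons, ih]
      show (m ||| pvMaskOf _ _ _ _) ||| pvMaskOf _ _ _ _ = _
      rw [pv_maskOf_or]
      simp [List.any_cons]

-- ===== VERDICT (by name: the statement is the Claim_ definition above) =====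
theorem generate_suggestion_spec : Claim_equal_generate_suggestion := by
  intro password _
  unfold Spec_generate_suggestion generate_suggestion generate_suggestion_alt
  rw [pv_mask_eq]
  simp only [Nat.zero_or]
  cases h1 : password.toList.any PySem.Chars.islower <;>
    cases h2 : password.toList.any PySem.Chars.isupper <;>
    cases h3 : password.toList.any PySem.Chars.isdigit <;>
    cases h4 : password.toList.any (fun c => pvSpecials.contains c) <;>
    simp only [pvMaskOf, pvMessages, Bool.not_true, Bool.not_false] <;>
    simp [PySem.Str.join] <;>
    split_ifs <;> simp_all [PySem.Str.join] <;> omega
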